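-- pv_equiv track=rewrite | github.com/pawgajda/codewars-solutions | python/linux_history_and_exclamation_mark_command_series4.py | bang_start_string
-- ===== SOURCE A (Python) =====
-- def bang_start_string(s, history):
--     hist = history.split("\n")
--     hist = [i.strip() for i in hist]
--     # remove numbers from hist entries
--     hist = [" ".join(i.split()[1:]) for i in hist]
--     # reverse the list because we look for most recent command
--     hist = list(reversed(hist))
--
--     for entry in hist:
--         if entry.startswith(s):
--             # parse found entry
--             return entry
--
--     return f"!{s}: event not found"
-- ===== SOURCE B (Python) =====
-- def bang_start_string(s, history):
--     result = f"!{s}: event not found"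
--     for line in history.split("\n"):
--         entry = " ".join(line.strip().split()[1:])
--         if entry.startswith(s):
--             result = entry
--     return result
-- ===== Notes on version B (the rewrite author's own statement) =====
-- stated objective: simpler
-- what changed: Single forward pass with a keep-last accumulator initialized to the sentinel, replacing A's three list comprehensions plus reversed copy plus early-return scan.
import Mathlib
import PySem

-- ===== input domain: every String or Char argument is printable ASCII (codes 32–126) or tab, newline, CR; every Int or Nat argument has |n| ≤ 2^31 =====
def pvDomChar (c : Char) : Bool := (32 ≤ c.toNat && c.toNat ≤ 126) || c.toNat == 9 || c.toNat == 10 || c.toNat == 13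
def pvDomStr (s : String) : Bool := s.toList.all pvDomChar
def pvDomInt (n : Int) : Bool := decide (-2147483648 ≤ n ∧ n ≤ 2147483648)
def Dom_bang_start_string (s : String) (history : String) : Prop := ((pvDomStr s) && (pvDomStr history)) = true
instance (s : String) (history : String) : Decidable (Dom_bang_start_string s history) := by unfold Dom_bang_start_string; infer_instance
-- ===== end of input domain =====

-- B replaces A's strip/renumber/reverse comprehension chain and early-return scan by one
-- forward pass keeping the last matching entry in an accumulator (objective: simpler).

-- ===== PORT A =====
-- " ".join(i.split()[1:])   (split? "\n" is never none for the literal nonempty separator)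
def pvRenumber_A (i : String) : String :=
  PySem.Str.join " " (PySem.List.slice (PySem.Str.split₀ i) (some 1) none)

-- the 'for entry in hist: if entry.startswith(s): return entry' loop, then the sentinel
def pvLoop_A (s : String) : List String → String
  | [] => "!" ++ s ++ ": event not found"
  | entry :: rest =>
      if PySem.Str.startswith entry s then entry else pvLoop_A s rest

def bang_start_string (s : String) (history : String) : String :=
  let hist := (PySem.Str.split? history "\n").getD []
  let hist := hist.map (fun i => PySem.Str.strip i)
  let hist := hist.map (fun i => pvRenumber_A i)
  let hist := hist.reverse
  pvLoop_A s hist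

-- ===== PORT B =====
-- entry = " ".join(line.strip().split()[1:])
def pvEntry_B (line : String) : String :=
  PySem.Str.join " " (PySem.List.slice (PySem.Str.split₀ (PySem.Str.strip line)) (some 1) none)

def bang_start_string_alt (s : String) (history : String) : String :=
  ((PySem.Str.split? history "\n").getD []).foldl
    (fun result line =>
      let entry := pvEntry_B line
      if PySem.Str.startswith entry s then entry else result)
    ("!" ++ s ++ ": event not found")

-- ===== PRECONDITION & SPEC =====
def Spec_bang_start_string (s : String) (history : String) (out : String) : Prop := out = bang_start_string_alt s history
instance (s : String) (history : String) (out : String) : Decidable (Spec_bang_start_string s history out) := by unfold Spec_bang_start_string; infer_instance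

-- ===== CLAIM (what is proved, stated in full; the proofs are below) =====
def Claim_equal_bang_start_string : Prop := ∀ (s : String) (history : String), Dom_bang_start_string s history → Spec_bang_start_string s history (bang_start_string s history)

-- ===== LEMMAS AND PROOFS =====

-- generic "first match else default" over a list, the shape of A's loop
def pvFirstP (p : String → Bool) (d : String) : List String → String
  | [] => d
  | e :: t => if p e then e else pvFirstP p d t

theorem pvLoop_A_eq_firstP (s : String) (l : List String) :
    pvLoop_A s l = pvFirstP (fun e => PySem.Str.startswith e s) ("!" ++ s ++ ": event not found") l := by
  induction l with
  | nil => rfl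
  | cons e t ih => simp [pvLoop_A, pvFirstP, ih]

theorem pvFirstP_append_singleton (p : String → Bool) (d e : String) (l : List String) :
    pvFirstP p d (l ++ [e]) = pvFirstP p (if p e then e else d) l := by
  induction l with
  | nil => rfl
  | cons x t ih => simp [pvFirstP, ih]

-- B's keep-last forward fold equals "first match in the reversed mapped list"
theorem pvB_loop_eq (s d : String) (l : List String) :
    l.foldl (fun r line => if PySem.Str.startswith (pvEntry_B line) s then pvEntry_B line else r) d
      = pvFirstP (fun e => PySem.Str.startswith e s) d ((l.map pvEntry_B).reverse) := by
  induction l generalizing d with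
  | nil => rfl
  | cons e t ih =>
      simp only [List.foldl_cons, List.map_cons, List.reverse_cons]
      rw [ih, pvFirstP_append_singleton]

theorem bang_start_string_spec : Claim_equal_bang_start_string := by
  intro s history _
  show bang_start_string s history = bang_start_string_alt s history
  show pvLoop_A s
        (((((PySem.Str.split? history "\n").getD []).map (fun i => PySem.Str.strip i)).map
          (fun i => pvRenumber_A i)).reverse)
      = ((PySem.Str.split? history "\n").getD []).foldl
          (fun result line => if PySem.Str.startswith (pvEntry_B line) s then pvEntry_B line else result)
          ("!" ++ s ++ ": event not found")
  rw [pvB_loop_eq, List.map_map, pvLoop_A_eq_firstP]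
  rfl
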